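-- pv_equiv track=rewrite | github.com/blazeout/python | 20. lc819 最常见的单词/main.py | mostCommonWord
-- ===== SOURCE A (Python) =====
-- from collections import Counter
--
-- def mostCommonWord(paragraph: str, banned: [str]) -> str:
--     n = len(paragraph)
--     ban = set(banned)
--     count = Counter()
--     word = ""
--     for i in range(n + 1):
--         if i < n and paragraph[i].isalpha():
--             word += paragraph[i].lower()
--         elif word != "":
--             if word not in ban:
--                 count[word] += 1
--             word = ""
--     maxCount = max(count.values())
--     return next(strs for strs, v in count.items() if v == maxCount)
-- ===== SOURCE B (Python) =====
-- from collections import Counter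
--
-- def mostCommonWord(paragraph: str, banned: [str]) -> str:
--     ban = set(banned)
--     words = ''.join(c if c.isalpha() else ' ' for c in paragraph.lower()).split()
--     count = Counter(w for w in words if w not in ban)
--     maxCount = max(count.values())
--     return next(w for w, v in count.items() if v == maxCount)
-- ===== Notes on version B (the rewrite author's own statement) =====
-- stated objective: idiomatic
-- what changed: B replaces A's per-character accumulator state machine (index loop with a growing 'word' buffer flushed into the Counter) by whole-paragraph tokenization - lowercase, translate non-letters to spaces, str.split() - followed by one Counter over the ban-filtered word list.
import Mathlib
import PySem

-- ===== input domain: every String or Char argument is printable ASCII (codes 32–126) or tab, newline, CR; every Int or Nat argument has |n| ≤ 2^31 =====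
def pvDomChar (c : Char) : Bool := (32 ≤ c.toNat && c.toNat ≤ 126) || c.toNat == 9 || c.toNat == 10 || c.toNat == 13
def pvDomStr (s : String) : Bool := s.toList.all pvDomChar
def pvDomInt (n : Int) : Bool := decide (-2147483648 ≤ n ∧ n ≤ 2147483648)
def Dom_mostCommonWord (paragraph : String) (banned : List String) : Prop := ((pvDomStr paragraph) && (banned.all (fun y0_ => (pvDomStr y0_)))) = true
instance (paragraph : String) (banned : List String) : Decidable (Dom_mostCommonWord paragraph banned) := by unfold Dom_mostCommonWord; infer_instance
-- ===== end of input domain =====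

-- B replaces A's per-character accumulator state machine by whole-paragraph tokenization
-- (lowercase, translate non-letters to spaces, split) followed by a Counter (objective: idiomatic).

-- ===== PORT A =====
-- the loop body of A for a character of the paragraph ('word' carried as List Char; 'word += ch' = w ++ [ch])
def pvAStep (ban : PySem.Set String) (st : List Char × PySem.Dict String Int) (c : Char) :
    List Char × PySem.Dict String Int :=
  if PySem.Chars.isalpha c then (st.1 ++ [PySem.Chars.lowerChar c], st.2)
  else if st.1.isEmpty then st
  else ([], if ban.contains (String.ofList st.1) then st.2
            else st.2.modify (String.ofList st.1) 0 (· + 1))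

def mostCommonWord (paragraph : String) (banned : List String) : String :=
  let ban := PySem.Set.ofList banned
  -- for i in range(n+1): iterations i < n are pvAStep on paragraph[i]; the iteration i = n
  -- has 'i < n' false, i.e. it is exactly the elif-branch (the final flush below)
  let st := paragraph.toList.foldl (pvAStep ban) ([], PySem.Dict.empty)
  let count := if st.1.isEmpty then st.2
               else if ban.contains (String.ofList st.1) then st.2
               else st.2.modify (String.ofList st.1) 0 (· + 1)
  -- max(count.values()) raises ValueError on an empty Counter: none here, excluded by Pre_
  match PySem.List.max? count.values (fun v => v) with
  | none => ""
  | some maxCount =>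
    match count.items.find? (fun p => p.2 == maxCount) with
    | some p => p.1
    | none => ""   -- unreachable: max? returned a value occurring in values

-- ===== PORT B =====
def mostCommonWord_alt (paragraph : String) (banned : List String) : String :=
  let ban := PySem.Set.ofList banned
  let words := PySem.Str.split₀ (String.ofList
    ((PySem.Str.lower paragraph).toList.map (fun c => if PySem.Chars.isalpha c then c else ' ')))
  let count := PySem.Dict.counter (words.filter (fun w => !ban.contains w))
  match PySem.List.max? count.values (fun v => v) with
  | none => ""
  | some maxCount =>
    match count.items.find? (fun p => p.2 == maxCount) with
    | some p => p.1
    | none => ""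

-- ===== PRECONDITION & SPEC =====
-- the lowercased maximal letter-runs of the paragraph (spec-level notion used only by Pre_)
def pvWords (paragraph : String) : List String :=
  PySem.Str.split₀ (String.ofList
    (paragraph.toList.map (fun c => if PySem.Chars.isalpha c then PySem.Chars.lowerChar c else ' ')))

-- Pre_ excludes exactly the inputs where every word of the paragraph is banned (or there is no
-- word at all): there Python's max() over the empty Counter raises ValueError.
def Pre_mostCommonWord (paragraph : String) (banned : List String) : Prop :=
  ∃ w ∈ pvWords paragraph, w ∉ banned
instance (paragraph : String) (banned : List String) : Decidable (Pre_mostCommonWord paragraph banned) := by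
  unfold Pre_mostCommonWord; infer_instance

def pvWitness_mostCommonWord : String × List String := ("Bob hit a ball, the hit BALL flew.", ["hit"])

def Spec_mostCommonWord (paragraph : String) (banned : List String) (out : String) : Prop := out = mostCommonWord_alt paragraph banned
instance (paragraph : String) (banned : List String) (out : String) : Decidable (Spec_mostCommonWord paragraph banned out) := by unfold Spec_mostCommonWord; infer_instance

-- ===== CLAIM (what is proved, stated in full; the proofs are below) =====
def Claim_equal_mostCommonWord : Prop := ∀ (paragraph : String) (banned : List String), Dom_mostCommonWord paragraph banned → Pre_mostCommonWord paragraph banned → Spec_mostCommonWord paragraph banned (mostCommonWord paragraph banned)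

-- ===== LEMMAS AND PROOFS =====

-- the token state machine both programs implement: lowercased maximal letter-runs,
-- with 'w' the letters of the current (unfinished) word
def pvToks (cs : List Char) (w : List Char) : List (List Char) :=
  match cs with
  | [] => if w.isEmpty then [] else [w]
  | c :: rest =>
    if PySem.Chars.isalpha c then pvToks rest (w ++ [PySem.Chars.lowerChar c])
    else if w.isEmpty then pvToks rest []
    else w :: pvToks rest []

theorem pvChle (a b : Char) : (a ≤ b) ↔ (a.toNat ≤ b.toNat) := by
  rw [Char.le_def, UInt32.le_iff_toNat_le]; rfl

theorem pvToNat_lower (c : Char) (h : 65 ≤ c.toNat ∧ c.toNat ≤ 90) :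
    (Char.ofNat (c.toNat + 32)).toNat = c.toNat + 32 := by
  rw [Char.toNat_ofNat, if_pos (Or.inl (by omega))]

theorem pvIsalpha_lowerChar (c : Char) :
    PySem.Chars.isalpha (PySem.Chars.lowerChar c) = PySem.Chars.isalpha c := by
  have hA : 'A'.toNat = 65 := rfl
  have hZ : 'Z'.toNat = 90 := rfl
  have ha : 'a'.toNat = 97 := rfl
  have hz : 'z'.toNat = 122 := rfl
  simp only [PySem.Chars.isalpha, PySem.Chars.isupper, PySem.Chars.islower, PySem.Chars.lowerChar,
    pvChle, Bool.and_eq_true, decide_eq_true_eq, hA, hZ, ha, hz]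
  split_ifs with h
  · rw [pvToNat_lower c (by omega)]
    apply Bool.eq_iff_iff.mpr
    simp only [Bool.or_eq_true, Bool.and_eq_true, decide_eq_true_eq]
    omega
  · rfl

theorem pvIsspace_lowerChar_of_alpha (c : Char) (h : PySem.Chars.isalpha c = true) :
    PySem.Chars.isspace (PySem.Chars.lowerChar c) = false := by
  have hA : 'A'.toNat = 65 := rfl
  have hZ : 'Z'.toNat = 90 := rfl
  have ha : 'a'.toNat = 97 := rfl
  have hz : 'z'.toNat = 122 := rfl
  simp only [PySem.Chars.isalpha, PySem.Chars.isupper, PySem.Chars.islower,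
    pvChle, Bool.or_eq_true, Bool.and_eq_true, decide_eq_true_eq, hA, hZ, ha, hz] at h
  simp only [PySem.Chars.lowerChar, PySem.Chars.isupper, pvChle, PySem.Chars.isspace,
    Bool.and_eq_true, decide_eq_true_eq, hA, hZ]
  split_ifs with hu
  · rw [pvToNat_lower c (by omega)]
    simp only [Bool.or_eq_false_iff, Bool.and_eq_false_iff, decide_eq_false_iff_not, not_le]
    omega
  · simp only [not_and, not_le] at hu
    simp only [Bool.or_eq_false_iff, Bool.and_eq_false_iff, decide_eq_false_iff_not, not_le]
    omega

-- A's loop (plus the final flush) folds the ban-filtered counting update over the tokens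
theorem pvA_loop (ban : PySem.Set String) (cs : List Char) (w : List Char) (d : PySem.Dict String Int) :
    (if (cs.foldl (pvAStep ban) (w, d)).1.isEmpty then (cs.foldl (pvAStep ban) (w, d)).2
     else if ban.contains (String.ofList (cs.foldl (pvAStep ban) (w, d)).1) then
       (cs.foldl (pvAStep ban) (w, d)).2
     else (cs.foldl (pvAStep ban) (w, d)).2.modify
       (String.ofList (cs.foldl (pvAStep ban) (w, d)).1) 0 (· + 1))
    = (pvToks cs w).foldl
        (fun d t => if ban.contains (String.ofList t) then d
                    else d.modify (String.ofList t) 0 (· + 1)) d := by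
  induction cs generalizing w d with
  | nil =>
    simp only [List.foldl_nil, pvToks]
    by_cases hw : w.isEmpty <;> simp [hw]
  | cons c rest ih =>
    simp only [List.foldl_cons, pvToks, pvAStep]
    by_cases hc : PySem.Chars.isalpha c
    · simp only [hc, if_true]
      exact ih (w ++ [PySem.Chars.lowerChar c]) d
    · by_cases hw : w.isEmpty
      · simp only [hc, hw, if_false, if_true, Bool.false_eq_true]
        have hwnil : w = [] := by
          cases w with
          | nil => rfl
          | cons a l => simp at hw
        subst hwnil
        exact ih [] d
      · simp only [hc, hw, if_false, Bool.false_eq_true, List.foldl_cons]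
        by_cases hb : ban.contains (String.ofList w) <;>
          simp only [hb, if_true, if_false, Bool.false_eq_true] <;> exact ih [] _

-- B's whitespace split of the masked character list computes the same tokens
theorem pvB_split (cs : List Char) (wr : List Char) (acc : List (List Char)) :
    PySem.Chars.split₀.go
      (cs.map (fun c => if PySem.Chars.isalpha c then PySem.Chars.lowerChar c else ' ')) wr acc
    = acc.reverse ++ pvToks cs wr.reverse := by
  induction cs generalizing wr acc with
  | nil =>
    simp only [List.map_nil, PySem.Chars.split₀.go, pvToks, List.isEmpty_reverse]
    by_cases hw : wr.isEmpty <;> simp [hw]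
  | cons c rest ih =>
    simp only [List.map_cons, PySem.Chars.split₀.go, pvToks]
    by_cases hc : PySem.Chars.isalpha c
    · simp only [hc, if_true, pvIsspace_lowerChar_of_alpha c hc, Bool.false_eq_true, if_false]
      rw [ih (PySem.Chars.lowerChar c :: wr) acc]
      simp
    · have hsp : PySem.Chars.isspace ' ' = true := rfl
      simp only [hc, if_false, hsp, if_true, Bool.false_eq_true]
      by_cases hw : wr.isEmpty
      · have hwr : wr = [] := by
          cases wr with
          | nil => rfl
          | cons a l => simp at hw
        subst hwr
        simp only [List.isEmpty_nil, if_true, List.reverse_nil]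
        rw [ih [] acc]
        rfl
      · simp only [hw, Bool.false_eq_true, if_false, List.isEmpty_reverse]
        rw [ih [] (wr.reverse :: acc)]
        simp

-- the two counts coincide
theorem pvCounts (paragraph : String) (banned : List String) :
    (if (paragraph.toList.foldl (pvAStep (PySem.Set.ofList banned)) ([], PySem.Dict.empty)).1.isEmpty then
       (paragraph.toList.foldl (pvAStep (PySem.Set.ofList banned)) ([], PySem.Dict.empty)).2
     else if (PySem.Set.ofList banned).contains (String.ofList (paragraph.toList.foldl (pvAStep (PySem.Set.ofList banned)) ([], PySem.Dict.empty)).1) then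
       (paragraph.toList.foldl (pvAStep (PySem.Set.ofList banned)) ([], PySem.Dict.empty)).2
     else (paragraph.toList.foldl (pvAStep (PySem.Set.ofList banned)) ([], PySem.Dict.empty)).2.modify
            (String.ofList (paragraph.toList.foldl (pvAStep (PySem.Set.ofList banned)) ([], PySem.Dict.empty)).1) 0 (· + 1))
    = PySem.Dict.counter
        ((PySem.Str.split₀ (String.ofList
           ((PySem.Str.lower paragraph).toList.map (fun c => if PySem.Chars.isalpha c then c else ' ')))).filter
                    (fun w => !(PySem.Set.ofList banned).contains w)) := by
  rw [pvA_loop]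
  have hmask : (PySem.Str.lower paragraph).toList.map (fun c => if PySem.Chars.isalpha c then c else ' ')
      = paragraph.toList.map (fun c => if PySem.Chars.isalpha c then PySem.Chars.lowerChar c else ' ') := by
    simp only [PySem.Str.toList_lower, PySem.Chars.lower, List.map_map]
    apply List.map_congr_left
    intro c _
    simp only [Function.comp_apply, pvIsalpha_lowerChar]
  rw [hmask]
  simp only [PySem.Str.split₀, String.toList_ofList, PySem.Chars.split₀]
  rw [pvB_split paragraph.toList [] []]
  simp only [List.reverse_nil, List.nil_append, PySem.Dict.counter, List.foldl_filter,
    List.foldl_map]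
  have hfun : (fun (d : PySem.Dict String Int) (t : List Char) =>
        if (!(PySem.Set.ofList banned).contains (String.ofList t)) then
          d.modify (String.ofList t) 0 (· + 1) else d)
      = (fun d t => if (PySem.Set.ofList banned).contains (String.ofList t) then d
          else d.modify (String.ofList t) 0 (· + 1)) := by
    funext d t
    cases h : (PySem.Set.ofList banned).contains (String.ofList t) <;> rfl
  rw [hfun]


-- ===== VERDICT (by name: the statement is the Claim_ definition above) =====
theorem mostCommonWord_spec : Claim_equal_mostCommonWord := by
  intro paragraph banned _ _
  unfold Spec_mostCommonWord mostCommonWord mostCommonWord_alt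
  simp only [pvCounts]
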